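-- pv_equiv track=rewrite | github.com/bxff/remarkable-tldraw | rmc/src/rmc/exporters/tldraw.py | add_char_set_keys
-- ===== SOURCE A (Python) =====
-- TLDRAW_CHARS = "0123456789ABCDEFGHIJKLMNOPQRSTUVWXYZabcdefghijklmnopqrstuvwxyz"
--
-- TLDRAW_CHARS_DICT = {char: i for i, char in enumerate(TLDRAW_CHARS)}
--
-- def add_char_set_keys(a: str, b: str) -> str:
--     """
--     Add two character set keys.
--
--     Args:
--         a: First key
--         b: Second key
--
--     Returns:
--         The sum as a character set key
--     """
--     base = len(TLDRAW_CHARS)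
--     max_len = max(len(a), len(b))
--     padded_a = a.rjust(max_len, TLDRAW_CHARS[0])
--     padded_b = b.rjust(max_len, TLDRAW_CHARS[0])
--
--     result = []
--     carry = 0
--
--     for i in range(max_len - 1, -1, -1):
--         digit_a = TLDRAW_CHARS_DICT[padded_a[i]]
--         digit_b = TLDRAW_CHARS_DICT[padded_b[i]]
--
--         sum_digits = digit_a + digit_b + carry
--         carry = sum_digits // base
--         remainder = sum_digits % base
--
--         result.append(TLDRAW_CHARS[remainder])
--
--     if carry > 0:
--         result.append(TLDRAW_CHARS[carry])
--
--     return ''.join(reversed(result))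
-- ===== SOURCE B (Python) =====
-- TLDRAW_CHARS = "0123456789ABCDEFGHIJKLMNOPQRSTUVWXYZabcdefghijklmnopqrstuvwxyz"
--
-- TLDRAW_CHARS_DICT = {char: i for i, char in enumerate(TLDRAW_CHARS)}
--
--
-- def add_char_set_keys(a: str, b: str) -> str:
--     """Add two base-62 keys by decoding to integers, adding, re-encoding."""
--     def decode(s):
--         n = 0
--         for ch in s:
--             n = n * 62 + TLDRAW_CHARS_DICT[ch]
--         return n
--
--     total = decode(a) + decode(b)
--     digits = []
--     while total:
--         total, r = divmod(total, 62)
--         digits.append(TLDRAW_CHARS[r])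
--     digits.reverse()
--     return ''.join(digits).rjust(max(len(a), len(b)), TLDRAW_CHARS[0])
-- ===== Notes on version B (the rewrite author's own statement) =====
-- stated objective: alternative
-- what changed: B decodes both keys to Python integers by a fold, adds them once, re-encodes the sum by repeated divmod and left-pads to the original width, instead of A's digit-by-digit schoolbook addition with an explicit carry over padded strings.
import Mathlib
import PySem

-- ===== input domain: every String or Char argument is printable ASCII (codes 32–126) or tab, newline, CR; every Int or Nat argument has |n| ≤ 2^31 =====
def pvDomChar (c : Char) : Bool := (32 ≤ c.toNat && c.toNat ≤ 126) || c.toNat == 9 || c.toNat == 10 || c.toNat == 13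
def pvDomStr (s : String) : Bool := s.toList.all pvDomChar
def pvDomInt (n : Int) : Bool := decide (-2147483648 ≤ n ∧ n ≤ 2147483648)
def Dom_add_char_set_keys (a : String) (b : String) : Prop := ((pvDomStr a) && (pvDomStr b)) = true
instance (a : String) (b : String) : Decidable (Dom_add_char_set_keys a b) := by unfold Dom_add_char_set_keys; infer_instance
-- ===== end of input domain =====

-- B decodes both keys to integers, adds them, re-encodes and left-pads, instead of
-- A's digit-by-digit schoolbook addition with an explicit carry (alternative algorithm).

-- Shared module-level context of both Pythons: TLDRAW_CHARS and TLDRAW_CHARS_DICT.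
def tldrawChars : List Char :=
  "0123456789ABCDEFGHIJKLMNOPQRSTUVWXYZabcdefghijklmnopqrstuvwxyz".toList

-- TLDRAW_CHARS_DICT[c]: the dict comprehension over enumerate(TLDRAW_CHARS) with distinct
-- keys is lookup-by-first-index; KeyError (none) is excluded by Pre_, getD 0 is unreachable there.
def charsDigit (c : Char) : Nat := (tldrawChars.idxOf? c).getD 0

-- TLDRAW_CHARS[k] for an in-range k (every index used is < 62, so getD is exact).
def charOf (k : Nat) : Char := tldrawChars.getD k '0'

-- ===== PORT A =====
-- One loop iteration of A: reads the two column characters, adds digits and carry,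
-- appends TLDRAW_CHARS[remainder] to result.  Digits and carry are nonnegative, so
-- Python's // and % coincide with Nat division/mod here (base = 62 > 0).
def stepA (st : List Char × Nat) (p : Char × Char) : List Char × Nat :=
  let sum_digits := charsDigit p.1 + charsDigit p.2 + st.2
  (st.1 ++ [charOf (sum_digits % 62)], sum_digits / 62)

def add_char_set_keys (a : String) (b : String) : String :=
  let la := a.toList
  let lb := b.toList
  let maxLen := max la.length lb.length
  -- rjust(max_len, TLDRAW_CHARS[0]) ported by hand: pad on the left with '0' (exact)
  let paddedA := List.replicate (maxLen - la.length) '0' ++ la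
  let paddedB := List.replicate (maxLen - lb.length) '0' ++ lb
  -- for i in range(max_len-1, -1, -1): reads padded_a[i] and padded_b[i]; rendered as a
  -- left fold over the reversed list of the character pairs (same iterations, same state)
  let res := ((paddedA.zip paddedB).reverse).foldl stepA ([], 0)
  let result := if res.2 > 0 then res.1 ++ [charOf res.2] else res.1
  String.ofList result.reverse   -- ''.join(reversed(result))

-- ===== PORT B =====
-- int_a/int_b: n = n*62 + TLDRAW_CHARS_DICT[ch] over the string
def decodeB62 (cs : List Char) : Nat := cs.foldl (fun n c => n * 62 + charsDigit c) 0

-- the while-loop of B: digits collected least-significant first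
def lsbChars (n : Nat) : List Char :=
  if h : n = 0 then [] else charOf (n % 62) :: lsbChars (n / 62)
  decreasing_by exact Nat.div_lt_self (Nat.pos_of_ne_zero h) (by norm_num)

def add_char_set_keys_alt (a : String) (b : String) : String :=
  let la := a.toList
  let lb := b.toList
  let total := decodeB62 la + decodeB62 lb
  let s := (lsbChars total).reverse       -- digits.reverse(); ''.join(digits)
  let w := max la.length lb.length
  String.ofList (List.replicate (w - s.length) '0' ++ s)   -- .rjust(w, TLDRAW_CHARS[0])

-- ===== PRECONDITION & SPEC =====
-- Pre_ excludes exactly the inputs on which Python A raises KeyError: a character of a or b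
-- that is not in TLDRAW_CHARS (B raises there too).
def Pre_add_char_set_keys (a : String) (b : String) : Prop :=
  (a.toList.all tldrawChars.contains && b.toList.all tldrawChars.contains) = true
instance (a : String) (b : String) : Decidable (Pre_add_char_set_keys a b) := by
  unfold Pre_add_char_set_keys; infer_instance

def pvWitness_add_char_set_keys : String × String := ("1", "z")

def Spec_add_char_set_keys (a : String) (b : String) (out : String) : Prop := out = add_char_set_keys_alt a b
instance (a : String) (b : String) (out : String) : Decidable (Spec_add_char_set_keys a b out) := by unfold Spec_add_char_set_keys; infer_instance

-- ===== CLAIM (what is proved, stated in full; the proofs are below) =====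
def Claim_equal_add_char_set_keys : Prop := ∀ (a : String) (b : String), Dom_add_char_set_keys a b → Pre_add_char_set_keys a b → Spec_add_char_set_keys a b (add_char_set_keys a b)

-- ===== LEMMAS AND PROOFS =====

-- every digit value is < 62 (idxOf? hits inside the 62-character list, getD default is 0)
lemma charsDigit_lt (c : Char) : charsDigit c < 62 := by
  unfold charsDigit
  cases h : tldrawChars.idxOf? c with
  | none => simp
  | some i =>
    obtain ⟨hlt, -⟩ := List.idxOf?_eq_some_iff.mp h
    have h62 : tldrawChars.length = 62 := by decide
    simpa [h62] using hlt

lemma charsDigit_zero : charsDigit '0' = 0 := by decide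

-- foldl of the decode step from an arbitrary accumulator
lemma decode_shift (cs : List Char) (n : Nat) :
    cs.foldl (fun n c => n * 62 + charsDigit c) n
      = n * 62 ^ cs.length + decodeB62 cs := by
  induction cs generalizing n with
  | nil => simp [decodeB62]
  | cons c t ih =>
    simp only [List.foldl_cons, decodeB62] at *
    rw [ih, ih (0 * 62 + charsDigit c)]
    simp [pow_succ]
    ring

lemma decode_cons (c : Char) (t : List Char) :
    decodeB62 (c :: t) = charsDigit c * 62 ^ t.length + decodeB62 t := by
  simpa [decodeB62] using decode_shift t (charsDigit c)

lemma decode_lt (cs : List Char) : decodeB62 cs < 62 ^ cs.length := by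
  induction cs with
  | nil => simp [decodeB62]
  | cons c t ih =>
    rw [decode_cons]
    have hd := charsDigit_lt c
    have : charsDigit c * 62 ^ t.length + decodeB62 t
        < (charsDigit c + 1) * 62 ^ t.length := by nlinarith [pow_pos (by norm_num : (0:ℕ) < 62) t.length]
    calc charsDigit c * 62 ^ t.length + decodeB62 t
        < (charsDigit c + 1) * 62 ^ t.length := this
      _ ≤ 62 * 62 ^ t.length := by
          exact Nat.mul_le_mul_right _ (by omega)
      _ = 62 ^ (c :: t).length := by rw [List.length_cons]; ring

lemma decode_replicate_append (k : Nat) (cs : List Char) :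
    decodeB62 (List.replicate k '0' ++ cs) = decodeB62 cs := by
  induction k with
  | zero => simp
  | succ k ih =>
    have : List.replicate (k+1) '0' ++ cs = '0' :: (List.replicate k '0' ++ cs) := by
      simp [List.replicate_succ]
    rw [this, decode_cons, charsDigit_zero, ih]; simp

-- cf n V : the n least-significant base-62 digit characters of V, least significant first
def cf : Nat → Nat → List Char
  | 0, _ => []
  | n + 1, V => charOf (V % 62) :: cf n (V / 62)

lemma cf_congr (n V q : Nat) : cf n (V + q * 62 ^ n) = cf n V := by
  induction n generalizing V q with
  | zero => simp [cf]
  | succ n ih =>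
    have h1 : (V + q * 62 ^ (n+1)) % 62 = V % 62 := by
      rw [pow_succ, ← mul_assoc]
      exact Nat.add_mul_mod_self_right V (q * 62 ^ n) 62
    have h2 : (V + q * 62 ^ (n+1)) / 62 = V / 62 + q * 62 ^ n := by
      rw [pow_succ, ← mul_assoc]
      exact Nat.add_mul_div_right V (q * 62 ^ n) (by norm_num)
    simp [cf, h1, h2, ih]

lemma cf_snoc (n V : Nat) : cf (n + 1) V = cf n V ++ [charOf (V / 62 ^ n % 62)] := by
  induction n generalizing V with
  | zero => simp [cf]
  | succ n ih =>
    show charOf (V % 62) :: cf (n+1) (V / 62) = (charOf (V % 62) :: cf n (V / 62)) ++ _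
    rw [ih]
    simp [Nat.div_div_eq_div_mul, pow_succ']

-- the schoolbook loop computes exactly the low digits and the high quotient of the sum
lemma fold_stepA (ps : List (Char × Char)) :
    ps.foldr (fun p st => stepA st p) ([], 0)
      = (cf ps.length (decodeB62 (ps.map Prod.fst) + decodeB62 (ps.map Prod.snd)),
         (decodeB62 (ps.map Prod.fst) + decodeB62 (ps.map Prod.snd)) / 62 ^ ps.length) := by
  induction ps with
  | nil => simp [decodeB62, cf]
  | cons p t ih =>
    set Vt := decodeB62 (t.map Prod.fst) + decodeB62 (t.map Prod.snd) with hVt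
    have hV : decodeB62 ((p :: t).map Prod.fst) + decodeB62 ((p :: t).map Prod.snd)
        = Vt + (charsDigit p.1 + charsDigit p.2) * 62 ^ t.length := by
      simp only [List.map_cons, decode_cons, List.length_map, hVt]; ring
    have hdiv : (Vt + (charsDigit p.1 + charsDigit p.2) * 62 ^ t.length) / 62 ^ t.length
        = Vt / 62 ^ t.length + (charsDigit p.1 + charsDigit p.2) := by
      exact Nat.add_mul_div_right _ _ (pow_pos (by norm_num) _)
    rw [List.foldr_cons, ih, hV]
    simp only [stepA, List.length_cons, Prod.mk.injEq]
    constructor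
    · rw [cf_snoc, cf_congr, hdiv]
      rw [Nat.add_comm (Vt / 62 ^ t.length) (charsDigit p.1 + charsDigit p.2)]
    · rw [pow_succ, ← Nat.div_div_eq_div_mul, hdiv]
      congr 1
      omega

lemma lsbChars_zero : lsbChars 0 = [] := by rw [lsbChars]; simp

lemma lsbChars_pos (n : Nat) (h : n ≠ 0) :
    lsbChars n = charOf (n % 62) :: lsbChars (n / 62) := by
  rw [lsbChars]; simp [h]

-- for V < 62^n, cf n V is the bare encoding followed by zero padding up to n digits
lemma cf_eq_lsb_pad (n V : Nat) (h : V < 62 ^ n) :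
    cf n V = lsbChars V ++ List.replicate (n - (lsbChars V).length) '0' := by
  induction n generalizing V with
  | zero =>
    interval_cases V
    simp [cf, lsbChars_zero]
  | succ n ih =>
    by_cases hV : V = 0
    · subst hV
      have : cf (n + 1) 0 = charOf 0 :: cf n 0 := by simp [cf]
      rw [this, ih 0 (pow_pos (by norm_num) _), lsbChars_zero]
      simp only [List.nil_append, List.length_nil, Nat.sub_zero, List.replicate_succ,
        List.cons.injEq]
      exact ⟨by decide, trivial⟩
    · rw [lsbChars_pos V hV]
      have hdiv : V / 62 < 62 ^ n := by
        rw [Nat.div_lt_iff_lt_mul (by norm_num)]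
        calc V < 62 ^ (n+1) := h
          _ = 62 ^ n * 62 := by rw [pow_succ]
      show charOf (V % 62) :: cf n (V / 62) = _
      rw [ih _ hdiv]
      simp [Nat.succ_sub_succ]

lemma lsb_length_le (n V : Nat) (h : V < 62 ^ n) : (lsbChars V).length ≤ n := by
  induction n generalizing V with
  | zero => interval_cases V; simp [lsbChars_zero]
  | succ n ih =>
    by_cases hV : V = 0
    · simp [hV, lsbChars_zero]
    · rw [lsbChars_pos V hV]
      have hdiv : V / 62 < 62 ^ n := by
        rw [Nat.div_lt_iff_lt_mul (by norm_num)]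
        calc V < 62 ^ (n+1) := h
          _ = 62 ^ n * 62 := by rw [pow_succ]
      simpa using ih _ hdiv

lemma lsb_length_gt (n V : Nat) (h : 62 ^ n ≤ V) : n < (lsbChars V).length := by
  induction n generalizing V with
  | zero =>
    have : V ≠ 0 := by positivity
    rw [lsbChars_pos V this]; simp
  | succ n ih =>
    have hV : V ≠ 0 := by
      have := Nat.one_le_iff_ne_zero.mpr (pow_ne_zero (n+1) (by norm_num : (62:ℕ) ≠ 0))
      omega
    rw [lsbChars_pos V hV]
    have : 62 ^ n ≤ V / 62 := by
      rw [Nat.le_div_iff_mul_le (by norm_num)]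
      calc 62 ^ n * 62 = 62 ^ (n+1) := by rw [pow_succ]
        _ ≤ V := h
    simpa using ih _ this

lemma cf_length (n V : Nat) : (cf n V).length = n := by
  induction n generalizing V with
  | zero => simp [cf]
  | succ n ih => simp [cf, ih]

-- the two final list shapes coincide
lemma main_lists (n V : Nat) (hV : V < 2 * 62 ^ n) :
    (if V / 62 ^ n > 0 then cf n V ++ [charOf (V / 62 ^ n)] else cf n V).reverse
      = List.replicate (n - (lsbChars V).reverse.length) '0' ++ (lsbChars V).reverse := by
  by_cases hc : V < 62 ^ n
  · have h0 : V / 62 ^ n = 0 := Nat.div_eq_of_lt hc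
    rw [h0]
    simp only [gt_iff_lt, lt_irrefl, if_false]
    rw [cf_eq_lsb_pad n V hc]
    simp [List.reverse_append]
  · rw [not_lt] at hc
    have hpos : 0 < V / 62 ^ n := Nat.div_pos hc (pow_pos (by norm_num) _)
    have hlt : V / 62 ^ n < 62 := by
      have h2 : V / 62 ^ n < 2 := by
        rw [Nat.div_lt_iff_lt_mul (pow_pos (by norm_num) _)]
        omega
      omega
    have hVlt : V < 62 ^ (n + 1) := by
      calc V < 2 * 62 ^ n := hV
        _ ≤ 62 * 62 ^ n := by nlinarith [pow_pos (by norm_num : (0:ℕ) < 62) n]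
        _ = 62 ^ (n+1) := by rw [pow_succ]; ring
    have hlen : (lsbChars V).length = n + 1 := by
      have h1 := lsb_length_le (n+1) V hVlt
      have h2 := lsb_length_gt n V hc
      omega
    have hsnoc : lsbChars V = cf n V ++ [charOf (V / 62 ^ n)] := by
      have := cf_eq_lsb_pad (n+1) V hVlt
      rw [cf_snoc, hlen] at this
      simpa [Nat.mod_eq_of_lt hlt] using this.symm
    simp only [gt_iff_lt, hpos, if_true]
    rw [hsnoc]
    have : n - (cf n V ++ [charOf (V / 62 ^ n)]).reverse.length = 0 := by
      simp [cf_length]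
    rw [this]
    simp

-- ===== VERDICT (by name: the statement is the Claim_ definition above) =====
theorem add_char_set_keys_spec : Claim_equal_add_char_set_keys := by
  intro a b _ _
  unfold Spec_add_char_set_keys
  simp only [add_char_set_keys, add_char_set_keys_alt]
  generalize a.toList = la
  generalize b.toList = lb
  set n := max la.length lb.length with hn
  set pa := List.replicate (n - la.length) '0' ++ la with hpa
  set pb := List.replicate (n - lb.length) '0' ++ lb with hpb
  have hlenA : pa.length = n := by rw [hpa]; simp; omega
  have hlenB : pb.length = n := by rw [hpb]; simp; omega
  have hzip : (pa.zip pb).length = n := by simp [hlenA, hlenB]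
  have hfst : (pa.zip pb).map Prod.fst = pa := List.map_fst_zip (by omega)
  have hsnd : (pa.zip pb).map Prod.snd = pb := List.map_snd_zip (by omega)
  have hfold := fold_stepA (pa.zip pb)
  rw [hzip, hfst, hsnd] at hfold
  have hva : decodeB62 pa = decodeB62 la := decode_replicate_append _ _
  have hvb : decodeB62 pb = decodeB62 lb := decode_replicate_append _ _
  set V := decodeB62 la + decodeB62 lb with hV
  rw [hva, hvb, ← hV] at hfold
  have hbound : V < 2 * 62 ^ n := by
    have h1 : decodeB62 la < 62 ^ n := by
      calc decodeB62 la < 62 ^ la.length := decode_lt la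
        _ ≤ 62 ^ n := Nat.pow_le_pow_right (by norm_num) (le_max_left _ _)
    have h2 : decodeB62 lb < 62 ^ n := by
      calc decodeB62 lb < 62 ^ lb.length := decode_lt lb
        _ ≤ 62 ^ n := Nat.pow_le_pow_right (by norm_num) (le_max_right _ _)
    omega
  have hmain := main_lists n V hbound
  rw [List.foldl_reverse, hfold]
  exact congrArg String.ofList hmain
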